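-- pv_equiv track=rewrite | github.com/akhil-kumar-capillary/context_gen_tool | apps/api/app/services/databricks/sql_extractor.py | remove_sql_comments
-- ===== SOURCE A (Python) =====
-- def remove_sql_comments(sql: str) -> str:
--     """Remove SQL comments (-- and /* */) while preserving quoted strings."""
--     if not sql:
--         return sql
--     result = []
--     i = 0
--     n = len(sql)
--     while i < n:
--         if sql[i] == "'":
--             j = i + 1
--             while j < n:
--                 if sql[j] == "'" and j + 1 < n and sql[j + 1] == "'":
--                     j += 2
--                 elif sql[j] == "'":
--                     j += 1
--                     break
--                 else:
--                     j += 1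
--             result.append(sql[i:j])
--             i = j
--         elif sql[i : i + 2] == "/*":
--             end = sql.find("*/", i + 2)
--             if end == -1:
--                 break
--             i = end + 2
--         elif sql[i : i + 2] == "--":
--             end = sql.find("\n", i)
--             if end == -1:
--                 break
--             i = end
--         else:
--             result.append(sql[i])
--             i += 1
--     return "".join(result).strip()
-- ===== SOURCE B (Python) =====
-- def remove_sql_comments(sql: str) -> str:
--     """Remove SQL comments (-- and /* */) while preserving quoted strings.
--
--     Single flat character-at-a-time scan with an explicit state variable
--     (NORMAL / STRING / LINE / BLOCK) instead of nested scans and find() jumps.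
--     """
--     NORMAL, STRING, LINE, BLOCK = 0, 1, 2, 3
--     out = []
--     state = NORMAL
--     i = 0
--     n = len(sql)
--     while i < n:
--         c = sql[i]
--         if state == NORMAL:
--             if c == "'":
--                 out.append(c)
--                 state = STRING
--                 i += 1
--             elif c == "/" and sql[i + 1 : i + 2] == "*":
--                 state = BLOCK
--                 i += 2
--             elif c == "-" and sql[i + 1 : i + 2] == "-":
--                 state = LINE
--                 i += 2
--             else:
--                 out.append(c)
--                 i += 1
--         elif state == STRING:
--             if c == "'" and sql[i + 1 : i + 2] == "'":
--                 out.append("'")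
--                 out.append("'")
--                 i += 2
--             elif c == "'":
--                 out.append(c)
--                 state = NORMAL
--                 i += 1
--             else:
--                 out.append(c)
--                 i += 1
--         elif state == LINE:
--             if c == "\n":
--                 out.append(c)
--                 state = NORMAL
--                 i += 1
--             else:
--                 i += 1
--         else:  # BLOCK: skip until "*/"
--             if c == "*" and sql[i + 1 : i + 2] == "/":
--                 state = NORMAL
--                 i += 2
--             else:
--                 i += 1
--     return "".join(out).strip()
-- ===== Notes on version B (the rewrite author's own statement) =====
-- stated objective: simpler
-- what changed: Replaces A's nested inner quote-scanning loop and find()-based index jumps with one flat single-pass state machine (NORMAL/STRING/LINE_COMMENT/BLOCK_COMMENT) that examines one character plus one lookahead per step.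
import Mathlib
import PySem

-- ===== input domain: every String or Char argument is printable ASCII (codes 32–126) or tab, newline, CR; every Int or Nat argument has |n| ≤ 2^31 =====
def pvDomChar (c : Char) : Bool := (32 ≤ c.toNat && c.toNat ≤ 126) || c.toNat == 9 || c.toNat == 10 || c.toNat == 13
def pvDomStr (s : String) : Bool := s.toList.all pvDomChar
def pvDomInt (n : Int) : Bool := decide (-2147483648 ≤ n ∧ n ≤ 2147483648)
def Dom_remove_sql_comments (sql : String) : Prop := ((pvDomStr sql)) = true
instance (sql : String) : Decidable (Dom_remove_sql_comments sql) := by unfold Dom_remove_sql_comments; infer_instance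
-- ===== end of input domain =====

-- B replaces A's nested quote-scanning loop and find() jumps by one flat
-- character-at-a-time state machine (NORMAL/STRING/LINE/BLOCK); objective: simpler, same cost.

-- ===== PORT A =====

-- inner `while j < n` loop of the quote branch; returns the final j.
-- fuel only makes the recursion structural: the loop advances j every step, so
-- fuel = cs.length always suffices (proofs use cs.length - j ≤ fuel).
def pvScanJ (cs : List Char) (fuel j : Nat) : Nat :=
  match fuel with
  | 0 => j
  | fuel + 1 =>
    if j < cs.length then
      if cs.getD j ' ' = '\'' ∧ j + 1 < cs.length ∧ cs.getD (j + 1) ' ' = '\'' then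
        pvScanJ cs fuel (j + 2)
      else if cs.getD j ' ' = '\'' then j + 1
      else pvScanJ cs fuel (j + 1)
    else j

-- outer `while i < n` loop of A; acc is `result` (strings kept as char lists; "".join = flatten).
-- fuel only makes the recursion structural: i strictly increases every iteration,
-- so fuel = cs.length + 1 always suffices (proofs use cs.length - i < fuel).
def pvLoopA (cs : List Char) (fuel i : Nat) (acc : List (List Char)) : List (List Char) :=
  match fuel with
  | 0 => acc
  | fuel + 1 =>
    if i < cs.length then
      if cs.getD i ' ' = '\'' then
        -- sql[i:j] = (cs.drop i).take (j - i) (0 ≤ i ≤ j, exact)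
        pvLoopA cs fuel (pvScanJ cs cs.length (i + 1))
          (acc ++ [(cs.drop i).take (pvScanJ cs cs.length (i + 1) - i)])
      else if (cs.drop i).take 2 = ['/', '*'] then  -- sql[i:i+2] == "/*"
        if PySem.Chars.findFrom cs ['*', '/'] ((i + 2 : Nat) : Int) none = -1 then acc
        else pvLoopA cs fuel ((PySem.Chars.findFrom cs ['*', '/'] ((i + 2 : Nat) : Int) none).toNat + 2) acc
      else if (cs.drop i).take 2 = ['-', '-'] then  -- sql[i:i+2] == "--"
        if PySem.Chars.findFrom cs ['\n'] ((i : Nat) : Int) none = -1 then acc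
        else pvLoopA cs fuel (PySem.Chars.findFrom cs ['\n'] ((i : Nat) : Int) none).toNat acc
      else
        pvLoopA cs fuel (i + 1) (acc ++ [[cs.getD i ' ']])
    else acc

def remove_sql_comments (sql : String) : String :=
  if sql = "" then sql
  else PySem.Str.strip (String.ofList (pvLoopA sql.toList (sql.toList.length + 1) 0 []).flatten)

-- ===== PORT B =====

inductive PvSt where
  | normal | instr | line | block
deriving DecidableEq, Repr

-- the single flat state-machine loop of B: one character at a time plus one
-- lookahead character (Python's sql[i+1:i+2] test is the second pattern position)
def pvGoB : PvSt → List Char → List Char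
  | _, [] => []
  | .normal, '\'' :: rest => '\'' :: pvGoB .instr rest
  | .normal, '/' :: '*' :: rest => pvGoB .block rest
  | .normal, '-' :: '-' :: rest => pvGoB .line rest
  | .normal, c :: rest => c :: pvGoB .normal rest
  | .instr, '\'' :: '\'' :: rest => '\'' :: '\'' :: pvGoB .instr rest
  | .instr, '\'' :: rest => '\'' :: pvGoB .normal rest
  | .instr, c :: rest => c :: pvGoB .instr rest
  | .line, '\n' :: rest => '\n' :: pvGoB .normal rest
  | .line, _ :: rest => pvGoB .line rest
  | .block, '*' :: '/' :: rest => pvGoB .normal rest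
  | .block, _ :: rest => pvGoB .block rest

def remove_sql_comments_alt (sql : String) : String :=
  PySem.Str.strip (String.ofList (pvGoB .normal sql.toList))

-- ===== PRECONDITION & SPEC =====
def Spec_remove_sql_comments (sql : String) (out : String) : Prop := out = remove_sql_comments_alt sql
instance (sql : String) (out : String) : Decidable (Spec_remove_sql_comments sql out) := by unfold Spec_remove_sql_comments; infer_instance

-- ===== CLAIM (what is proved, stated in full; the proofs are below) =====
def Claim_equal_remove_sql_comments : Prop := ∀ (sql : String), Dom_remove_sql_comments sql → Spec_remove_sql_comments sql (remove_sql_comments sql)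

-- ===== LEMMAS AND PROOFS =====

-- sql[i:i+2] == "xy" pins i+2 ≤ len and the two characters
theorem pvTake2_facts (cs : List Char) (i : Nat) (a b : Char)
    (h : (cs.drop i).take 2 = [a, b]) :
    i + 2 ≤ cs.length ∧ cs.getD i ' ' = a ∧ cs.getD (i + 1) ' ' = b := by
  have hlen := congrArg List.length h
  simp [List.length_take, List.length_drop] at hlen
  have h0 := congrArg (fun l => l.getD 0 ' ') h
  have h1 := congrArg (fun l => l.getD 1 ' ') h
  simp [List.getD, List.getElem?_drop] at h0 h1
  refine ⟨by omega, ?_, ?_⟩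
  · simpa [List.getD, cs.getElem?_eq_getElem (by omega : i < cs.length)] using h0
  · simpa [List.getD, cs.getElem?_eq_getElem (by omega : i + 1 < cs.length)] using h1

-- head of cs.drop i is the i-th character
theorem pvHeadDrop (cs : List Char) (i : Nat) (hi : i < cs.length) :
    (cs.drop i).head? = some (cs.getD i ' ') := by
  rw [List.head?_drop, List.getElem?_eq_getElem hi]
  simp [List.getD, List.getElem?_eq_getElem hi]

-- cs.drop i exposes the i-th character
theorem pvDropCons (cs : List Char) (i : Nat) (hi : i < cs.length) :
    cs.drop i = cs.getD i ' ' :: cs.drop (i + 1) := by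
  rw [List.drop_eq_getElem_cons hi]
  simp [List.getD, List.getElem?_eq_getElem hi]

-- the inner loop never moves j back
theorem pvScanJ_ge (cs : List Char) (fuel j : Nat) : j ≤ pvScanJ cs fuel j := by
  fun_induction pvScanJ cs fuel j with
  | case1 => omega
  | case2 => omega
  | case3 => omega
  | case4 => omega
  | case5 => omega

-- sql.find(sub, k) is ≥ k when it succeeds
theorem pvFindFrom_toNat_ge (cs sub : List Char) (k : Nat) (hk : k ≤ cs.length)
    (h : PySem.Chars.findFrom cs sub (k : Int) none ≠ -1) :
    k ≤ (PySem.Chars.findFrom cs sub (k : Int) none).toNat := by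
  have hs := PySem.Chars.findFrom_natCast_spec cs sub k hk h
  omega

-- sql.find("\n", i) lands strictly after i when sql[i] is not a newline
theorem pvFindNl_gt (cs : List Char) (i : Nat) (hi : i < cs.length)
    (hc : cs.getD i ' ' ≠ '\n')
    (h : PySem.Chars.findFrom cs ['\n'] (i : Int) none ≠ -1) :
    i < (PySem.Chars.findFrom cs ['\n'] (i : Int) none).toNat := by
  have hs := PySem.Chars.findFrom_natCast_spec cs ['\n'] i hi.le h
  rcases hs with ⟨h1, h2, _⟩
  rcases Nat.lt_or_ge i (PySem.Chars.findFrom cs ['\n'] (i : Int) none).toNat with h' | h'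
  · exact h'
  · exfalso
    have he : (PySem.Chars.findFrom cs ['\n'] (i : Int) none).toNat = i := by omega
    rw [he] at h2
    rcases h2 with ⟨t, ht⟩
    have : cs.getD i ' ' = '\n' := by
      have hdrop : cs.drop i = '\n' :: t := ht.symm
      have : (cs.drop i).getD 0 ' ' = '\n' := by rw [hdrop]; rfl
      simpa [List.getD, List.getElem?_drop] using this
    exact hc this

-- unfolding equations for the state machine in head?/tail form
theorem pvGoB_nil (st : PvSt) : pvGoB st [] = [] := by cases st <;> rfl

theorem pvGoB_normal_cons (c : Char) (rest : List Char) :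
    pvGoB .normal (c :: rest) =
      (if c = '\'' then c :: pvGoB .instr rest
       else if c = '/' ∧ rest.head? = some '*' then pvGoB .block rest.tail
       else if c = '-' ∧ rest.head? = some '-' then pvGoB .line rest.tail
       else c :: pvGoB .normal rest) := by
  by_cases h1 : c = '\''
  · subst h1; simp [pvGoB]
  · cases rest with
    | nil => simp [pvGoB, h1]
    | cons d rest2 =>
      by_cases h2 : c = '/' ∧ d = '*'
      · obtain ⟨rfl, rfl⟩ := h2; simp [pvGoB]
      · by_cases h3 : c = '-' ∧ d = '-'
        · obtain ⟨rfl, rfl⟩ := h3; simp [pvGoB]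
        · rw [if_neg h1, if_neg (by simpa using h2), if_neg (by simpa using h3)]
          rcases eq_or_ne c '/' with rfl | hc
          · have hd : d ≠ '*' := by simpa using h2
            simp [pvGoB, hd]
          · rcases eq_or_ne c '-' with rfl | hcc
            · have hd : d ≠ '-' := by simpa using h3
              simp [pvGoB, hd]
            · simp [pvGoB, hc, hcc]

theorem pvGoB_instr_cons (c : Char) (rest : List Char) :
    pvGoB .instr (c :: rest) =
      (if c = '\'' ∧ rest.head? = some '\'' then c :: '\'' :: pvGoB .instr rest.tail
       else if c = '\'' then c :: pvGoB .normal rest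
       else c :: pvGoB .instr rest) := by
  by_cases h1 : c = '\''
  · subst h1
    cases rest with
    | nil => simp [pvGoB]
    | cons d rest2 =>
      rcases eq_or_ne d '\'' with rfl | hd
      · simp [pvGoB]
      · simp [pvGoB, hd]
  · rw [if_neg (by rintro ⟨hc, -⟩; exact h1 hc), if_neg h1]
    cases rest with
    | nil => simp [pvGoB]
    | cons d rest2 => simp [pvGoB, h1]

theorem pvGoB_line_cons (c : Char) (rest : List Char) :
    pvGoB .line (c :: rest) =
      (if c = '\n' then c :: pvGoB .normal rest else pvGoB .line rest) := by
  rcases eq_or_ne c '\n' with rfl | hc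
  · simp [pvGoB]
  · simp [pvGoB, hc]

theorem pvGoB_block_cons (c : Char) (rest : List Char) :
    pvGoB .block (c :: rest) =
      (if c = '*' ∧ rest.head? = some '/' then pvGoB .normal rest.tail else pvGoB .block rest) := by
  by_cases h1 : c = '*'
  · subst h1
    cases rest with
    | nil => simp [pvGoB]
    | cons d rest2 =>
      rcases eq_or_ne d '/' with rfl | hd
      · simp [pvGoB]
      · simp [pvGoB, hd]
  · rw [if_neg (by rintro ⟨hc, -⟩; exact h1 hc)]
    cases rest with
    | nil => simp [pvGoB]
    | cons d rest2 => simp [pvGoB, h1]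

-- find l sub = 0 when sub is a prefix of l
theorem pvFind_eq_zero_of_prefix (sub l : List Char) (h : sub <+: l) :
    PySem.Chars.find l sub = 0 := by
  have hnn : 0 ≤ PySem.Chars.find l sub := (PySem.Chars.find_nonneg_iff l sub).2 h.isInfix
  obtain ⟨-, hmin⟩ := PySem.Chars.find_spec hnn
  by_contra hne
  have h0 : 0 < (PySem.Chars.find l sub).toNat := by omega
  exact hmin 0 h0 (by simpa using h)

-- one step of find, when sub does not match at the head
theorem pvFind_cons_of_not_prefix (sub : List Char) (c : Char) (t : List Char)
    (h : ¬ sub <+: (c :: t)) :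
    PySem.Chars.find (c :: t) sub =
      if PySem.Chars.isIn sub t then 1 + PySem.Chars.find t sub else -1 := by
  by_cases hin : PySem.Chars.isIn sub t
  · have hinf : sub <:+: t := (PySem.Chars.isIn_iff_infix sub t).1 hin
    have hinf' : sub <:+: (c :: t) := hinf.trans (List.suffix_cons c t).isInfix
    have hnn : 0 ≤ PySem.Chars.find (c :: t) sub := (PySem.Chars.find_nonneg_iff _ _).2 hinf'
    have hnn' : 0 ≤ PySem.Chars.find t sub := (PySem.Chars.find_nonneg_iff _ _).2 hinf
    obtain ⟨hp, hmin⟩ := PySem.Chars.find_spec hnn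
    obtain ⟨hp', hmin'⟩ := PySem.Chars.find_spec hnn'
    set r := (PySem.Chars.find (c :: t) sub).toNat with hr
    set s := (PySem.Chars.find t sub).toNat with hs
    have hr0 : r ≠ 0 := by
      intro h0; rw [h0] at hp; exact h (by simpa using hp)
    have hpt : sub <+: t.drop (r - 1) := by
      have : (c :: t).drop r = t.drop (r - 1) := by
        rcases Nat.exists_eq_add_of_lt (Nat.pos_of_ne_zero hr0) with ⟨m, hm⟩
        simp [show r = m + 1 by omega]
      rwa [this] at hp
    have h1 : ¬ (r - 1 < s) := fun hlt => hmin' (r - 1) hlt hpt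
    have h2 : ¬ (s + 1 < r) := by
      intro hlt
      exact hmin (s + 1) hlt (by simpa using hp')
    have : r = s + 1 := by omega
    simp only [hin, if_true]
    omega
  · have : ¬ sub <:+: (c :: t) := by
      intro hinf
      have : PySem.Chars.isIn sub (c :: t) = true := (PySem.Chars.isIn_iff_infix _ _).2 hinf
      obtain ⟨j, hj⟩ := (PySem.Chars.exists_prefix_drop_iff_isIn sub (c :: t)).2 this
      match j, hj with
      | 0, hj => exact h (by simpa using hj)
      | j + 1, hj =>
        have : sub <+: t.drop j := by simpa using hj
        have := (PySem.Chars.exists_prefix_drop_iff_isIn sub t).1 ⟨j, this⟩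
        simp [this] at hin
    rw [if_neg hin]
    exact (PySem.Chars.find_eq_neg_one_iff _ _).2 this

-- find from k returns k itself when the pattern matches at k
theorem pvFindFrom_self (cs sub : List Char) (k : Nat) (hk : k ≤ cs.length)
    (h : sub <+: cs.drop k) :
    PySem.Chars.findFrom cs sub (k : Int) none = (k : Int) := by
  rw [PySem.Chars.findFrom_natCast cs sub k hk, pvFind_eq_zero_of_prefix sub _ h]
  simp

-- find from k equals find from k+1 when the pattern does not match at k
theorem pvFindFrom_succ (cs sub : List Char) (k : Nat) (hk : k < cs.length)
    (h : ¬ sub <+: cs.drop k) :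
    PySem.Chars.findFrom cs sub (k : Int) none =
      PySem.Chars.findFrom cs sub ((k + 1 : Nat) : Int) none := by
  rw [PySem.Chars.findFrom_natCast cs sub k hk.le, PySem.Chars.findFrom_natCast cs sub (k + 1) hk]
  have hd : cs.drop k = cs.getD k ' ' :: cs.drop (k + 1) := pvDropCons cs k hk
  rw [hd] at h ⊢
  rw [pvFind_cons_of_not_prefix sub _ _ h]
  by_cases hin : PySem.Chars.isIn sub (cs.drop (k + 1)) = true
  · have hnn : 0 ≤ PySem.Chars.find (cs.drop (k + 1)) sub :=
      (PySem.Chars.find_nonneg_iff _ _).2 ((PySem.Chars.isIn_iff_infix _ _).1 hin)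
    rw [if_pos hin, if_neg (by omega), if_neg (by omega)]
    push_cast
    ring
  · have hm1 : PySem.Chars.find (cs.drop (k + 1)) sub = -1 :=
      (PySem.Chars.find_eq_neg_one_iff _ _).2
        ((PySem.Chars.isIn_eq_false_iff _ _).1 (by simpa using hin))
    rw [if_neg hin, hm1]
    simp

-- the quote branch of A equals the STRING state of B
theorem pvStrBridge (cs : List Char) (fuel j : Nat) (hfj : cs.length - j ≤ fuel) :
    pvGoB .instr (cs.drop j) =
      (cs.drop j).take (pvScanJ cs fuel j - j) ++ pvGoB .normal (cs.drop (pvScanJ cs fuel j)) := by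
  fun_induction pvScanJ cs fuel j with
  | case1 j =>
    have hnil : cs.drop j = [] := List.drop_eq_nil_of_le (by omega)
    simp [hnil, pvGoB_nil]
  | case2 j fuel hj hq ih =>
    obtain ⟨hq0, hj1, hq1⟩ := hq
    have hge := pvScanJ_ge cs fuel (j + 2)
    rw [pvDropCons cs j (by omega), pvDropCons cs (j + 1) (by omega), hq0, hq1]
    rw [pvGoB_instr_cons, if_pos (by simp)]
    simp only [List.tail_cons]
    rw [ih (by omega)]
    rw [show pvScanJ cs fuel (j + 2) - j = (pvScanJ cs fuel (j + 2) - (j + 2)) + 1 + 1 by omega]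
    simp [List.take_succ_cons]
  | case3 j fuel hj hnbig hq =>
    rw [pvDropCons cs j (by omega), hq]
    rw [pvGoB_instr_cons]
    have hcond : ¬ (('\'' : Char) = '\'' ∧ (cs.drop (j + 1)).head? = some '\'') := by
      rintro ⟨-, hh⟩
      rcases Nat.lt_or_ge (j + 1) cs.length with hlt | hge
      · rw [pvHeadDrop cs (j + 1) hlt] at hh
        exact hnbig ⟨hq, hlt, Option.some_inj.1 hh⟩
      · rw [List.head?_drop, List.getElem?_eq_none (by omega)] at hh
        simp at hh
    rw [if_neg hcond, if_pos rfl]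
    simp [List.take_succ_cons]
  | case4 j fuel hj hnbig hq ih =>
    have hge := pvScanJ_ge cs fuel (j + 1)
    rw [pvDropCons cs j (by omega)]
    rw [pvGoB_instr_cons, if_neg (by rintro ⟨hc, -⟩; exact hq hc), if_neg hq]
    rw [ih (by omega)]
    rw [show pvScanJ cs fuel (j + 1) - j = (pvScanJ cs fuel (j + 1) - (j + 1)) + 1 by omega]
    simp [List.take_succ_cons]
  | case5 j fuel hj =>
    have hnil : cs.drop j = [] := List.drop_eq_nil_of_le (by omega)
    simp [hnil, pvGoB_nil]

-- the "/*" branch of A equals the BLOCK state of B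
theorem pvBlockBridge (cs : List Char) (k : Nat) (hk : k ≤ cs.length) :
    pvGoB .block (cs.drop k) =
      (if PySem.Chars.findFrom cs ['*', '/'] (k : Int) none = -1 then []
       else pvGoB .normal
         (cs.drop ((PySem.Chars.findFrom cs ['*', '/'] (k : Int) none).toNat + 2))) := by
  induction hm : cs.length - k using Nat.strong_induction_on generalizing k with
  | _ m ih =>
  by_cases hpre : ['*', '/'] <+: cs.drop k
  · rw [pvFindFrom_self cs _ k hk hpre, if_neg (by omega)]
    obtain ⟨t, ht⟩ := hpre
    have ht2 : t = cs.drop (k + 2) := by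
      have := congrArg (List.drop 2) ht
      simpa [List.drop_drop, Nat.add_comm] using this
    have hd : cs.drop k = '*' :: '/' :: cs.drop (k + 2) := by rw [← ht, ht2]; rfl
    rw [hd, pvGoB_block_cons, if_pos (by simp), Int.toNat_natCast]
    rfl
  · rcases Nat.lt_or_ge k cs.length with hlt | hge
    · rw [pvFindFrom_succ cs _ k hlt hpre]
      rw [pvDropCons cs k hlt, pvGoB_block_cons]
      have hcond : ¬ (cs.getD k ' ' = '*' ∧ (cs.drop (k + 1)).head? = some '/') := by
        rintro ⟨hc, hh⟩
        obtain ⟨t, ht⟩ := List.head?_eq_some_iff.1 hh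
        exact hpre ⟨t, by rw [pvDropCons cs k hlt, hc, ht]; rfl⟩
      rw [if_neg hcond]
      exact ih (cs.length - (k + 1)) (by omega) (k + 1) hlt (by omega)
    · have hnil : cs.drop k = [] := List.drop_eq_nil_of_le hge
      rw [hnil, pvGoB_nil, PySem.Chars.findFrom_natCast cs _ k hk, hnil]
      simp [show PySem.Chars.find [] ['*', '/'] = -1 from by decide]

-- the "--" branch of A equals the LINE state of B
theorem pvLineBridge (cs : List Char) (k : Nat) (hk : k ≤ cs.length) :
    pvGoB .line (cs.drop k) =
      (if PySem.Chars.findFrom cs ['\n'] (k : Int) none = -1 then []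
       else pvGoB .normal (cs.drop (PySem.Chars.findFrom cs ['\n'] (k : Int) none).toNat)) := by
  induction hm : cs.length - k using Nat.strong_induction_on generalizing k with
  | _ m ih =>
  by_cases hpre : ['\n'] <+: cs.drop k
  · rw [pvFindFrom_self cs _ k hk hpre, if_neg (by omega), Int.toNat_natCast]
    obtain ⟨t, ht⟩ := hpre
    have ht2 : t = cs.drop (k + 1) := by
      have := congrArg (List.drop 1) ht
      simpa using this
    have hd : cs.drop k = '\n' :: cs.drop (k + 1) := by rw [← ht, ht2]; rfl
    rw [hd, pvGoB_line_cons, if_pos rfl, pvGoB_normal_cons]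
    rw [if_neg (by decide), if_neg (by rintro ⟨h, -⟩; exact absurd h (by decide)),
        if_neg (by rintro ⟨h, -⟩; exact absurd h (by decide))]
  · rcases Nat.lt_or_ge k cs.length with hlt | hge
    · rw [pvFindFrom_succ cs _ k hlt hpre]
      rw [pvDropCons cs k hlt, pvGoB_line_cons]
      have hcond : ¬ cs.getD k ' ' = '\n' := by
        intro hc
        exact hpre ⟨cs.drop (k + 1), by rw [pvDropCons cs k hlt, hc]; rfl⟩
      rw [if_neg hcond]
      exact ih (cs.length - (k + 1)) (by omega) (k + 1) hlt (by omega)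
    · have hnil : cs.drop k = [] := List.drop_eq_nil_of_le hge
      rw [hnil, pvGoB_nil, PySem.Chars.findFrom_natCast cs _ k hk, hnil]
      simp [show PySem.Chars.find [] ['\n'] = -1 from by decide]

-- "--" does not start a newline: shift sql.find("\n", i) to i+2
theorem pvNlStep (cs : List Char) (i : Nat) (hi : i < cs.length)
    (h2 : i + 2 ≤ cs.length)
    (hc0 : cs.getD i ' ' = '-') (hc1 : cs.getD (i + 1) ' ' = '-') :
    PySem.Chars.findFrom cs ['\n'] (i : Int) none =
      PySem.Chars.findFrom cs ['\n'] ((i + 2 : Nat) : Int) none := by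
  rw [pvFindFrom_succ cs _ i hi (by
        rintro ⟨t, ht⟩
        have hhead : (cs.drop i).head? = some '\n' := by rw [← ht]; rfl
        rw [pvHeadDrop cs i hi, hc0] at hhead
        simp at hhead)]
  rw [pvFindFrom_succ cs _ (i + 1) (by omega) (by
        rintro ⟨t, ht⟩
        have hhead : (cs.drop (i + 1)).head? = some '\n' := by rw [← ht]; rfl
        rw [pvHeadDrop cs (i + 1) (by omega), hc1] at hhead
        simp at hhead)]

-- main loop invariant: A's pieces flatten to B's state-machine output
theorem pvMain (cs : List Char) (fuel i : Nat) (acc : List (List Char))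
    (hfuel : cs.length - i < fuel) :
    (pvLoopA cs fuel i acc).flatten = acc.flatten ++ pvGoB .normal (cs.drop i) := by
  fun_induction pvLoopA cs fuel i acc with
  | case1 i acc =>
    omega
  | case2 i acc fuel hi hq ih =>
    have hge := pvScanJ_ge cs cs.length (i + 1)
    rw [ih (by omega)]
    rw [pvDropCons cs i hi, hq, pvGoB_normal_cons, if_pos rfl]
    rw [pvStrBridge cs cs.length (i + 1) (by omega)]
    rw [show pvScanJ cs cs.length (i + 1) - i = (pvScanJ cs cs.length (i + 1) - (i + 1)) + 1 by omega]
    simp [List.take_succ_cons]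
  | case3 i acc fuel hi hq h2 hf =>
    obtain ⟨hk, hc0, hc1⟩ := pvTake2_facts cs i '/' '*' h2
    have hh : (cs.drop (i + 1)).head? = some '*' := by
      rw [pvHeadDrop cs (i + 1) (by omega), hc1]
    rw [pvDropCons cs i hi, hc0, pvGoB_normal_cons]
    rw [if_neg (by decide), if_pos ⟨rfl, hh⟩, List.tail_drop]
    rw [pvBlockBridge cs (i + 2) hk, if_pos hf]
    simp
  | case4 i acc fuel hi hq h2 hf ih =>
    obtain ⟨hk, hc0, hc1⟩ := pvTake2_facts cs i '/' '*' h2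
    have hge := pvFindFrom_toNat_ge cs ['*', '/'] (i + 2) hk hf
    have hh : (cs.drop (i + 1)).head? = some '*' := by
      rw [pvHeadDrop cs (i + 1) (by omega), hc1]
    rw [ih (by omega)]
    rw [pvDropCons cs i hi, hc0, pvGoB_normal_cons]
    rw [if_neg (by decide), if_pos ⟨rfl, hh⟩, List.tail_drop]
    rw [pvBlockBridge cs (i + 2) hk, if_neg hf]
  | case5 i acc fuel hi hq h2 h3 hf =>
    obtain ⟨hk, hc0, hc1⟩ := pvTake2_facts cs i '-' '-' h3
    have hh : (cs.drop (i + 1)).head? = some '-' := by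
      rw [pvHeadDrop cs (i + 1) (by omega), hc1]
    rw [pvDropCons cs i hi, hc0, pvGoB_normal_cons]
    rw [if_neg (by decide), if_neg (by rintro ⟨h, -⟩; exact absurd h (by decide))]
    rw [if_pos ⟨rfl, hh⟩, List.tail_drop]
    rw [pvLineBridge cs (i + 2) hk, ← pvNlStep cs i hi hk hc0 hc1, if_pos hf]
    simp
  | case6 i acc fuel hi hq h2 h3 hf ih =>
    obtain ⟨hk, hc0, hc1⟩ := pvTake2_facts cs i '-' '-' h3
    have hgt : i < (PySem.Chars.findFrom cs ['\n'] (i : Int) none).toNat :=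
      pvFindNl_gt cs i hi (by rw [hc0]; decide) hf
    have hh : (cs.drop (i + 1)).head? = some '-' := by
      rw [pvHeadDrop cs (i + 1) (by omega), hc1]
    rw [ih (by omega)]
    rw [pvDropCons cs i hi, hc0, pvGoB_normal_cons]
    rw [if_neg (by decide), if_neg (by rintro ⟨h, -⟩; exact absurd h (by decide))]
    rw [if_pos ⟨rfl, hh⟩, List.tail_drop]
    rw [pvLineBridge cs (i + 2) hk, ← pvNlStep cs i hi hk hc0 hc1, if_neg hf]
  | case7 i acc fuel hi hq h2 h3 ih =>
    rw [ih (by omega), pvDropCons cs i hi, pvGoB_normal_cons, if_neg hq]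
    have hcond2 : ¬ (cs.getD i ' ' = '/' ∧ (cs.drop (i + 1)).head? = some '*') := by
      rintro ⟨hc, hh⟩
      obtain ⟨t, ht⟩ := List.head?_eq_some_iff.1 hh
      exact h2 (by rw [pvDropCons cs i hi, hc, ht]; rfl)
    have hcond3 : ¬ (cs.getD i ' ' = '-' ∧ (cs.drop (i + 1)).head? = some '-') := by
      rintro ⟨hc, hh⟩
      obtain ⟨t, ht⟩ := List.head?_eq_some_iff.1 hh
      exact h3 (by rw [pvDropCons cs i hi, hc, ht]; rfl)
    rw [if_neg hcond2, if_neg hcond3]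
    simp
  | case8 i acc fuel hi =>
    have hnil : cs.drop i = [] := List.drop_eq_nil_of_le (by omega)
    simp [hnil, pvGoB_nil]

-- ===== VERDICT (by name: the statement is the Claim_ definition above) =====
theorem remove_sql_comments_spec : Claim_equal_remove_sql_comments := by
  intro sql _
  unfold Spec_remove_sql_comments remove_sql_comments remove_sql_comments_alt
  by_cases h : sql = ""
  · subst h
    rw [if_pos rfl, show ("" : String).toList = [] from rfl, pvGoB_nil]
    rfl
  · rw [if_neg h]
    have hmain := pvMain sql.toList (sql.toList.length + 1) 0 [] (by omega)
    simp only [List.flatten_nil, List.nil_append, List.drop_zero] at hmain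
    rw [hmain]
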